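-- pv_equiv track=rewrite | github.com/abhinavdogra21/Rubix-Cube-Solver | backend/kociemba_api/src/enhanced_kociemba_solver.py | _fallback_solve_scramble
-- ===== SOURCE A (Python) =====
-- def _fallback_solve_scramble(scramble: str) -> str:
--     """Fallback method using move inversion"""
--     try:
--         move_inverses = {
--             'U': "U'", "U'": 'U', 'U2': 'U2',
--             'R': "R'", "R'": 'R', 'R2': 'R2',
--             'F': "F'", "F'": 'F', 'F2': 'F2',
--             'D': "D'", "D'": 'D', 'D2': 'D2',
--             'L': "L'", "L'": 'L', 'L2': 'L2',
--             'B': "B'", "B'": 'B', 'B2': 'B2'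
--         }
--
--         moves = scramble.split()
--         solution_moves = []
--
--         for move in reversed(moves):
--             if move in move_inverses:
--                 solution_moves.append(move_inverses[move])
--             else:
--                 solution_moves.append(move)
--
--         return ' '.join(solution_moves)
--
--     except Exception as e:
--         return f"Error: Fallback solve failed - {str(e)}"
-- ===== SOURCE B (Python) =====
-- def _fallback_solve_scramble(scramble: str) -> str:
--     """Invert a scramble by forward recursion on the token list, building the
--     answer string back-to-front by concatenation (no reversed(), no join)."""
--     def invert(move):
--         if move and move[0] in "URFDLB":
--             if move == move[0]:
--                 return move + "'"
--             if move == move[0] + "'":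
--                 return move[0]
--         return move
--
--     def build(tokens):
--         if not tokens:
--             return ''
--         if len(tokens) == 1:
--             return invert(tokens[0])
--         return build(tokens[1:]) + ' ' + invert(tokens[0])
--
--     return build(scramble.split())
-- ===== Notes on version B (the rewrite author's own statement) =====
-- stated objective: alternative
-- what changed: Replaces the reverse-then-loop-with-accumulator-and-join over an 18-entry inverse table by a forward structural recursion on the token list that builds the answer string back-to-front by direct concatenation, with a closed-form per-move inversion rule instead of the table; the dead try/except is dropped.
import Mathlib
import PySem

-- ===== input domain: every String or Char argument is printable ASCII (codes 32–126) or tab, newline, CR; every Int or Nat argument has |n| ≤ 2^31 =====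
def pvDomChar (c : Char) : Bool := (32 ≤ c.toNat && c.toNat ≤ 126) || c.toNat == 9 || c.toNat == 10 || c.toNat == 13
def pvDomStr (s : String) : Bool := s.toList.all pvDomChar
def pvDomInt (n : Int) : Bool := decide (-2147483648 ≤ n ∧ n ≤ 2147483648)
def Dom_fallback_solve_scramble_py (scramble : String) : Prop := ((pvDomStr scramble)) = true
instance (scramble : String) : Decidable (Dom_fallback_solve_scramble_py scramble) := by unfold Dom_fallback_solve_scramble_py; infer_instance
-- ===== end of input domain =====

-- B replaces A's reverse-then-loop over an 18-entry inverse table (plus join)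
-- by a forward structural recursion on the token list that builds the answer
-- string back-to-front by concatenation, with a closed-form per-move rule
-- (objective: alternative).

-- ===== PORT A =====
-- the dict literal `move_inverses`
def pvMoveInverses : PySem.Dict String String :=
  ((((((((((((((((((PySem.Dict.empty.insert
    "U" "U'").insert "U'" "U").insert "U2" "U2").insert
    "R" "R'").insert "R'" "R").insert "R2" "R2").insert
    "F" "F'").insert "F'" "F").insert "F2" "F2").insert
    "D" "D'").insert "D'" "D").insert "D2" "D2").insert
    "L" "L'").insert "L'" "L").insert "L2" "L2").insert
    "B" "B'").insert "B'" "B").insert "B2" "B2")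

-- A's try/except is unreachable (no statement in the body can raise), so the port is the try-body.
def fallback_solve_scramble_py (scramble : String) : String :=
  let move_inverses := pvMoveInverses
  let moves := PySem.Str.split₀ scramble
  let solution_moves := moves.reverse.foldl (fun acc move =>
    if move_inverses.contains move then
      acc ++ [(move_inverses.get? move).getD move]
    else
      acc ++ [move]) []
  PySem.Str.join " " solution_moves

-- ===== PORT B =====
-- B's `invert`: `move and move[0] in "URFDLB"` is a non-emptiness + membership
-- test; `move == move[0]` / `move == move[0] + "'"` are string equalities,
-- computed exactly on the char list (+ on strings = ++ on char lists).
def pvInvert (move : String) : String :=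
  match move.toList with
  | [] => move
  | c :: rest =>
    if "URFDLB".toList.contains c then
      if rest == [] then String.ofList (move.toList ++ ['\''])
      else if rest == ['\''] then String.ofList [c]
      else move
    else move

-- B's `build`: forward recursion, result assembled back-to-front; string
-- concatenation `build(tokens[1:]) + ' ' + invert(tokens[0])` is exact on
-- char lists (String.ofList at the end).
def pvBuildChars : List String → List Char
  | [] => []
  | [t] => (pvInvert t).toList
  | t :: u :: rest => pvBuildChars (u :: rest) ++ ' ' :: (pvInvert t).toList

def fallback_solve_scramble_py_alt (scramble : String) : String :=
  String.ofList (pvBuildChars (PySem.Str.split₀ scramble))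

-- ===== PRECONDITION & SPEC =====
def Spec_fallback_solve_scramble_py (scramble : String) (out : String) : Prop := out = fallback_solve_scramble_py_alt scramble
instance (scramble : String) (out : String) : Decidable (Spec_fallback_solve_scramble_py scramble out) := by unfold Spec_fallback_solve_scramble_py; infer_instance

-- ===== CLAIM (what is proved, stated in full; the proofs are below) =====
def Claim_equal_fallback_solve_scramble_py : Prop := ∀ (scramble : String), Dom_fallback_solve_scramble_py scramble → Spec_fallback_solve_scramble_py scramble (fallback_solve_scramble_py scramble)

-- ===== LEMMAS AND PROOFS =====

-- A's per-move computation, named so the fold can be rewritten as a map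
def pvInvA (move : String) : String :=
  if pvMoveInverses.contains move then (pvMoveInverses.get? move).getD move else move

theorem pvItems : pvMoveInverses.items = [("U","U'"),("U'","U"),("U2","U2"),("R","R'"),("R'","R"),("R2","R2"),("F","F'"),("F'","F"),("F2","F2"),("D","D'"),("D'","D"),("D2","D2"),("L","L'"),("L'","L"),("L2","L2"),("B","B'"),("B'","B"),("B2","B2")] := by rfl

set_option maxHeartbeats 1000000 in
theorem pvInvA_eq_pvInvert (m : String) : pvInvA m = pvInvert m := by
  have hb : ∀ k : String, (k == m) = (k.toList == m.toList) := fun k => by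
    rw [Bool.eq_iff_iff]; simp [String.toList_inj]
  have hm : m = String.ofList m.toList := String.ofList_toList.symm
  generalize hcs : m.toList = cs at hb hm
  subst hm
  unfold pvInvA pvInvert
  simp only [PySem.Dict.contains, PySem.Dict.get?, pvItems, List.any_cons, List.any_nil,
    List.find?, hb, String.toList_ofList]
  rcases cs with _ | ⟨c, _ | ⟨c2, _ | ⟨c3, rest⟩⟩⟩
  · simp
  · by_cases hc : c = 'U' ∨ c = 'R' ∨ c = 'F' ∨ c = 'D' ∨ c = 'L' ∨ c = 'B'
    · rcases hc with h|h|h|h|h|h <;> subst h <;> decide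
    · push Not at hc
      obtain ⟨h1, h2, h3, h4, h5, h6⟩ := hc
      simp [Ne.symm h1, Ne.symm h2, Ne.symm h3, Ne.symm h4, Ne.symm h5, Ne.symm h6,
        h1, h2, h3, h4, h5, h6]
  · by_cases hc : c = 'U' ∨ c = 'R' ∨ c = 'F' ∨ c = 'D' ∨ c = 'L' ∨ c = 'B'
    · by_cases hq : c2 = '\''
      · subst hq; rcases hc with h|h|h|h|h|h <;> subst h <;> decide
      · by_cases h7 : c2 = '2'
        · subst h7; rcases hc with h|h|h|h|h|h <;> subst h <;> decide
        · rcases hc with h|h|h|h|h|h <;> subst h <;>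
            simp [Ne.symm hq, Ne.symm h7, hq]
    · push Not at hc
      obtain ⟨h1, h2, h3, h4, h5, h6⟩ := hc
      simp [Ne.symm h1, Ne.symm h2, Ne.symm h3, Ne.symm h4, Ne.symm h5, Ne.symm h6,
        h1, h2, h3, h4, h5, h6]
  · simp

theorem pvJoin_cons_append_singleton (sep p q : List Char) (qs : List (List Char)) :
    PySem.Chars.join sep ((q :: qs) ++ [p]) = PySem.Chars.join sep (q :: qs) ++ sep ++ p := by
  induction qs generalizing q with
  | nil => simp [PySem.Chars.join_cons_cons, PySem.Chars.join_singleton]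
  | cons r rs ih =>
    have ih' := ih r
    rw [List.cons_append] at ih'
    rw [List.cons_append, List.cons_append, PySem.Chars.join_cons_cons, ih',
      PySem.Chars.join_cons_cons]
    simp [List.append_assoc]

theorem pvJoin_append_singleton (sep p : List Char) (ps : List (List Char)) (h : ps ≠ []) :
    PySem.Chars.join sep (ps ++ [p]) = PySem.Chars.join sep ps ++ sep ++ p := by
  match ps, h with
  | q :: qs, _ => exact pvJoin_cons_append_singleton sep p q qs

theorem pvBuildChars_eq (l : List String) :
    pvBuildChars l = PySem.Chars.join [' '] ((l.reverse.map pvInvert).map String.toList) := by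
  induction l with
  | nil => simp [pvBuildChars, PySem.Chars.join_nil]
  | cons t rest ih =>
    cases rest with
    | nil => simp [pvBuildChars, PySem.Chars.join_singleton]
    | cons u us =>
      have h1 : (t :: u :: us).reverse = (u :: us).reverse ++ [t] := by simp
      rw [show pvBuildChars (t :: u :: us) = pvBuildChars (u :: us) ++ ' ' :: (pvInvert t).toList from rfl,
        ih, h1]
      simp only [List.map_append, List.map_cons, List.map_nil]
      rw [pvJoin_append_singleton _ _ _ (by simp)]
      simp

theorem fallback_solve_scramble_py_spec : Claim_equal_fallback_solve_scramble_py := by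
  intro s _
  unfold Spec_fallback_solve_scramble_py fallback_solve_scramble_py fallback_solve_scramble_py_alt
  have hbody : (fun (acc : List String) (move : String) =>
      if pvMoveInverses.contains move then
        acc ++ [(pvMoveInverses.get? move).getD move]
      else acc ++ [move]) = (fun acc move => acc ++ [pvInvA move]) := by
    funext acc move
    unfold pvInvA
    split_ifs <;> rfl
  simp only [hbody, PySem.List.foldl_append_singleton_eq_map, List.nil_append]
  rw [PySem.Str.join, pvBuildChars_eq]
  congr 2
  exact congrArg (List.map String.toList) (List.map_congr_left (fun m _ => pvInvA_eq_pvInvert m))
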